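-- pv_equiv track=rewrite | github.com/BangSungjoon/TIL | algorythmWorkspace/ssafy/5178.py | back_order
-- ===== SOURCE A (Python) =====
-- def back_order(node, N, li):
--     if node <= N:
--         left = back_order(node*2, N, li)    # 왼쪽 자식
--         right = back_order(node*2+1, N, li) # 오른쪽 자식
--         li[node] += left + right            # 현재 노드에 왼쪽 자식과 오른쪽 자식값 더해주기
--         return li[node]                     # left + right 더하는 연산을 하므로 return 값이 있어야 한다.
--     else:                                   # 범위를 벗어났다면
--         return 0                            # 0 반환
-- ===== SOURCE B (Python) =====
-- def back_order(node, N, li):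
--     if node > N:
--         return 0
--     total = 0
--     for i in range(node, N + 1):
--         j = i
--         while j > node:
--             j //= 2
--         if j == node:
--             total += li[i]
--     return total
-- ===== Notes on version B (the rewrite author's own statement) =====
-- stated objective: alternative
-- what changed: A computes the subtree sum by a mutating postorder recursion (li[node] += left + right); B makes a single non-mutating pass over the index range [node, N], adding li[i] exactly when i's parent chain (repeated halving) reaches node. B does not mutate li; the equivalence is about the return value.
import Mathlib
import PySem

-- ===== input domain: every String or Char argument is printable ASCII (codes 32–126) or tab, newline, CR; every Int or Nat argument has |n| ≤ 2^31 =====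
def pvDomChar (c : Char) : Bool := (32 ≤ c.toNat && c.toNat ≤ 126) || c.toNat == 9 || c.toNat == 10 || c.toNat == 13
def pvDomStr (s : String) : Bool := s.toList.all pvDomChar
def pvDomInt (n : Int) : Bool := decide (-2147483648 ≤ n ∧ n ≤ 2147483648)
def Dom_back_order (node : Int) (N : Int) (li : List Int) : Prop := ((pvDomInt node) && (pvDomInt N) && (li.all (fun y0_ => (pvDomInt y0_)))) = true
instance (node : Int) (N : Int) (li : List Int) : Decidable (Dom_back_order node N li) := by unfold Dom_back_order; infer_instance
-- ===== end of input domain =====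

-- B replaces A's mutating postorder recursion by a single non-mutating scan of the index
-- range [node, N] that sums the entries whose parent chain reaches `node` (alternative
-- decomposition, not faster). A mutates `li` in place, B does not: the equivalence proved
-- here is about the RETURN value only.

-- ===== PORT A =====
-- A's recursion, with the mutated list threaded through and a fuel argument making the
-- Python recursion (which diverges for node ≤ 0 ≤ N, outside Pre_) total.
def backA : Nat → Int → Int → List Int → Int × List Int
  | 0, _, _, li => (0, li)
  | fuel+1, node, N, li =>
    if node ≤ N then
      let l := backA fuel (node*2) N li
      let r := backA fuel (node*2+1) N l.2
      -- li[node] += left + right; IndexError (index out of range) is outside Pre_, default 0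
      let v := PySem.List.pyGetD r.2 node 0 + (l.1 + r.1)
      (v, PySem.List.pySetD r.2 node v)
    else (0, li)

def back_order (node : Int) (N : Int) (li : List Int) : Int :=
  (backA (N.toNat + 1) node N li).1

-- ===== PORT B =====
-- the while loop `while j > node: j //= 2` as a fueled recursion (fuel only for totality;
-- inside Pre_ the chain strictly decreases, i.toNat + 1 steps always suffice)
def chase : Nat → Int → Int → Int
  | 0, _, j => j
  | fuel+1, node, j => if node < j then chase fuel node (PySem.Int.floordiv j 2) else j

def back_order_alt (node : Int) (N : Int) (li : List Int) : Int :=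
  if node > N then 0
  else
    (PySem.List.pyRange node (N+1) 1).foldl
      (fun total i =>
        if chase (i.toNat + 1) node i == node then total + PySem.List.pyGetD li i 0
        else total)
      0

-- ===== PRECONDITION & SPEC =====
-- `i`'s parent chain (repeated halving) reaches `node` (for node ≥ 1 the chain is strictly
-- decreasing, so i // 2^k = node for some k iff the chain passes through node)
def reachDown (node i : Nat) : Bool := decide (∃ k, k ≤ i ∧ i / 2 ^ k = node)

-- Pre_ excludes exactly the inputs where the Python A raises: node ≤ 0 ≤ N (infinite
-- recursion, RecursionError) and visited indices ≥ len(li) (IndexError).  A visits node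
-- and every index i ≤ N whose parent chain reaches node; a minimal out-of-range visited
-- index other than node has an in-range parent, so bounding the check by 2*len(li) is exact.
def Pre_back_order (node : Int) (N : Int) (li : List Int) : Prop :=
  N < node ∨
    (1 ≤ node ∧ node.toNat < li.length ∧
      ∀ i : Nat, i < 2 * li.length → i ≤ N.toNat → reachDown node.toNat i = true → i < li.length)
instance (node : Int) (N : Int) (li : List Int) : Decidable (Pre_back_order node N li) := by
  unfold Pre_back_order; infer_instance

def pvWitness_back_order : Int × Int × List Int := (1, 3, [5, -2, 7, 40])

def Spec_back_order (node : Int) (N : Int) (li : List Int) (out : Int) : Prop := out = back_order_alt node N li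
instance (node : Int) (N : Int) (li : List Int) (out : Int) : Decidable (Spec_back_order node N li out) := by unfold Spec_back_order; infer_instance

-- ===== CLAIM (what is proved, stated in full; the proofs are below) =====
def Claim_equal_back_order : Prop := ∀ (node : Int) (N : Int) (li : List Int), Dom_back_order node N li → Pre_back_order node N li → Spec_back_order node N li (back_order node N li)

-- ===== LEMMAS AND PROOFS =====

theorem div_pow_succ (i k : Nat) : i / 2 ^ (k+1) = (i / 2) / 2 ^ k := by
  rw [Nat.div_div_eq_div_mul]
  congr 1
  rw [pow_succ]; ring

theorem div_pow_succ' (i k : Nat) : i / 2 ^ (k+1) = (i / 2 ^ k) / 2 := by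
  rw [Nat.div_div_eq_div_mul, pow_succ]

theorem reach_refl (node : Nat) : reachDown node node = true := by
  simp only [reachDown, decide_eq_true_eq]
  exact ⟨0, by omega, by simp⟩

theorem reach_ge {node i : Nat} (h : reachDown node i = true) : node ≤ i := by
  simp only [reachDown, decide_eq_true_eq] at h
  obtain ⟨k, _, hk⟩ := h
  exact hk ▸ Nat.div_le_self i (2 ^ k)

theorem reach_le {node i : Nat} (h : i ≤ node) : reachDown node i = (i == node) := by
  simp only [reachDown]
  rcases eq_or_ne i node with rfl | he
  · simp only [beq_self_eq_true, decide_eq_true_eq]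
    exact ⟨0, by omega, by simp⟩
  · have hb : (i == node) = false := by simp [he]
    rw [hb, decide_eq_false_iff_not]
    rintro ⟨k, hk, hd⟩
    exact he (le_antisymm h (hd ▸ Nat.div_le_self i (2 ^ k)))

theorem reach_gt {node i : Nat} (h1 : 1 ≤ node) (h : node < i) :
    reachDown node i = reachDown node (i / 2) := by
  simp only [reachDown, decide_eq_decide]
  constructor
  · rintro ⟨k, hk, hd⟩
    match k with
    | 0 => omega
    | k+1 =>
      rw [div_pow_succ] at hd
      refine ⟨k, ?_, hd⟩
      have h2 : 2 ^ k ≤ i / 2 := by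
        rcases Nat.lt_or_ge (i / 2) (2 ^ k) with hlt | hge
        · rw [Nat.div_eq_of_lt hlt] at hd; omega
        · exact hge
      have := Nat.lt_two_pow_self (n := k)
      omega
  · rintro ⟨k, hk, hd⟩
    refine ⟨k+1, by omega, ?_⟩
    rw [div_pow_succ]; exact hd

theorem reach_child {node q : Nat} (h1 : 1 ≤ node)
    (h : reachDown (2*node) q = true ∨ reachDown (2*node+1) q = true) :
    reachDown node q = true := by
  simp only [reachDown, decide_eq_true_eq] at h ⊢
  rcases h with ⟨k, hk, hd⟩ | ⟨k, hk, hd⟩ <;>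
  · have h2 : 2 * 2 ^ k ≤ q := (Nat.le_div_iff_mul_le (by positivity)).mp (by omega)
    have h3 := Nat.lt_two_pow_self (n := k+1)
    have h4 : (2:Nat) ^ (k+1) = 2 * 2 ^ k := by rw [pow_succ]; ring
    refine ⟨k+1, by omega, ?_⟩
    rw [div_pow_succ', hd]
    omega

theorem reach_excl {node i : Nat} (h1 : 1 ≤ node)
    (ha : reachDown (2*node) i = true) (hb : reachDown (2*node+1) i = true) : False := by
  simp only [reachDown, decide_eq_true_eq] at ha hb
  obtain ⟨k, _, hk⟩ := ha
  obtain ⟨m, _, hm⟩ := hb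
  have hmk : m < k := by
    by_contra hge
    have hp : (2:Nat) ^ k ≤ 2 ^ m := Nat.pow_le_pow_right (by omega) (by omega)
    have h5 : i / 2 ^ m ≤ i / 2 ^ k := Nat.div_le_div_left hp (by positivity)
    omega
  have hadd : m + (k - m) = k := by omega
  have hsplit : i / 2 ^ k = (i / 2 ^ m) / 2 ^ (k - m) := by
    rw [Nat.div_div_eq_div_mul, ← pow_add, hadd]
  rw [hsplit, hm] at hk
  have h2 : (2:Nat) ≤ 2 ^ (k - m) := by
    calc (2:Nat) = 2 ^ 1 := by norm_num
    _ ≤ 2 ^ (k-m) := Nat.pow_le_pow_right (by omega) (by omega)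
  have h6 : (2*node+1) / 2 ^ (k - m) ≤ (2*node+1) / 2 := Nat.div_le_div_left h2 (by omega)
  omega

theorem reach_split {node : Nat} (h1 : 1 ≤ node) : ∀ i : Nat, node < i →
    reachDown node i = (reachDown (2*node) i || reachDown (2*node+1) i) := by
  intro i
  induction i using Nat.strong_induction_on with
  | _ i ih =>
    intro h
    by_cases hc : i ≤ 2*node+1
    · by_cases h2 : i = 2*node
      · subst h2
        rw [reach_gt h1 h, show 2*node/2 = node from by omega, reach_refl node,
          reach_refl (2*node)]
        simp
      · by_cases h3 : i = 2*node+1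
        · subst h3
          rw [reach_gt h1 h, show (2*node+1)/2 = node from by omega, reach_refl node,
            reach_refl (2*node+1)]
          simp
        · -- node < i < 2*node
          rw [reach_gt h1 h, reach_le (show i/2 ≤ node from by omega),
            reach_le (show i ≤ 2*node from by omega),
            reach_le (show i ≤ 2*node+1 from by omega)]
          have a1 : (i/2 == node) = false := by simp only [beq_eq_false_iff_ne, ne_eq]; omega
          have a2 : (i == 2*node) = false := by simp only [beq_eq_false_iff_ne, ne_eq]; omega
          have a3 : (i == 2*node+1) = false := by simp only [beq_eq_false_iff_ne, ne_eq]; omega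
          rw [a1, a2, a3]
          simp
    · -- i ≥ 2*node+2
      have hi2 : node < i / 2 := by omega
      rw [reach_gt h1 h, ih (i/2) (by omega) hi2,
        reach_gt (show 1 ≤ 2*node from by omega) (show 2*node < i from by omega),
        reach_gt (show 1 ≤ 2*node+1 from by omega) (show 2*node+1 < i from by omega)]

-- the subtree sum both programs compute: sum over i ∈ [node, N] of li[i] where the parent
-- chain of i reaches node
def Tsum (node N : Int) (li : List Int) : Int :=
  ((PySem.List.pyRange node (N+1) 1).map
    (fun i => if reachDown node.toNat i.toNat = true then PySem.List.pyGetD li i 0 else 0)).sum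

theorem pyGetD_toNat {xs : List Int} {i : Int} (h : 0 ≤ i) (d : Int) :
    PySem.List.pyGetD xs i d = xs.getD i.toNat d := by
  conv_lhs => rw [← Int.toNat_of_nonneg h]
  rw [PySem.List.pyGetD_natCast]

theorem Tsum_empty {node N : Int} (h : N < node) (li : List Int) : Tsum node N li = 0 := by
  rw [Tsum, PySem.List.pyRange_one_eq_nil (by omega)]; simp

theorem foldl_if_sum (l : List Int) (c : Int → Bool) (f : Int → Int) (a : Int) :
    l.foldl (fun s i => if c i then s + f i else s) a
      = a + (l.map (fun i => if c i then f i else 0)).sum := by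
  induction l generalizing a with
  | nil => simp
  | cons x xs ih =>
    simp only [List.foldl_cons, List.map_cons, List.sum_cons, ih]
    by_cases h : c x <;> simp [h] <;> ring

theorem sum_map_ext {a a' b : Int} (f : Int → Int) (h1 : a ≤ a')
    (h0 : ∀ i : Int, a ≤ i → i < a' → f i = 0) :
    ((PySem.List.pyRange a b 1).map f).sum = ((PySem.List.pyRange a' b 1).map f).sum := by
  rcases (show a' ≤ b ∨ b < a' from by omega) with hab | hab
  · rw [PySem.List.pyRange_one_append a a' b h1 hab, List.map_append, List.sum_append,
      List.sum_eq_zero, zero_add]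
    intro x hx
    simp only [List.mem_map] at hx
    obtain ⟨i, hi, rfl⟩ := hx
    rw [PySem.List.mem_pyRange_one] at hi
    exact h0 i hi.1 hi.2
  · rw [PySem.List.pyRange_one_eq_nil (le_of_lt hab)]
    simp only [List.map_nil, List.sum_nil]
    apply List.sum_eq_zero
    intro x hx
    simp only [List.mem_map] at hx
    obtain ⟨i, hi, rfl⟩ := hx
    rw [PySem.List.mem_pyRange_one] at hi
    exact h0 i hi.1 (by omega)

theorem sum_map_split (l : List Int) (f g : Int → Int) :
    (l.map (fun i => f i + g i)).sum = (l.map f).sum + (l.map g).sum := by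
  induction l with
  | nil => simp
  | cons x xs ih => simp [ih]; ring

theorem Tsum_congr {node N : Int} {li₁ li₂ : List Int} (h1 : 1 ≤ node)
    (h : ∀ p : Nat, p ≤ N.toNat → reachDown node.toNat p = true → li₁.getD p 0 = li₂.getD p 0) :
    Tsum node N li₁ = Tsum node N li₂ := by
  unfold Tsum
  congr 1
  apply List.map_congr_left
  intro i hi
  rw [PySem.List.mem_pyRange_one] at hi
  by_cases hr : reachDown node.toNat i.toNat = true
  · simp only [hr, if_true]
    rw [pyGetD_toNat (by omega), pyGetD_toNat (by omega)]
    exact h i.toNat (by omega) hr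
  · simp [hr]

theorem Tsum_dec {node N : Int} (li : List Int) (h1 : 1 ≤ node) (h2 : node ≤ N) :
    Tsum node N li
      = PySem.List.pyGetD li node 0 + Tsum (2*node) N li + Tsum (2*node+1) N li := by
  have hn1 : (2*node).toNat = 2*node.toNat := by omega
  have hn2 : (2*node+1).toNat = 2*node.toNat+1 := by omega
  have hsplit : ((PySem.List.pyRange (node+1) (N+1) 1).map
      (fun i => if reachDown node.toNat i.toNat = true then PySem.List.pyGetD li i 0 else 0)).sum
      = ((PySem.List.pyRange (node+1) (N+1) 1).map
          (fun i => if reachDown (2*node).toNat i.toNat = true then PySem.List.pyGetD li i 0 else 0)).sum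
        + ((PySem.List.pyRange (node+1) (N+1) 1).map
          (fun i => if reachDown (2*node+1).toNat i.toNat = true then PySem.List.pyGetD li i 0 else 0)).sum := by
    rw [← sum_map_split]
    apply congrArg
    apply List.map_congr_left
    intro i hi
    rw [PySem.List.mem_pyRange_one] at hi
    have hlt : node.toNat < i.toNat := by omega
    rw [reach_split (show 1 ≤ node.toNat from by omega) i.toNat hlt, hn1, hn2]
    rcases ha : reachDown (2*node.toNat) i.toNat with _ | _
    · simp
    · have hb : reachDown (2*node.toNat+1) i.toNat = false := by
        by_contra hbb
        rw [Bool.not_eq_false] at hbb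
        exact reach_excl (show 1 ≤ node.toNat from by omega) ha hbb
      simp [hb]
  have e1 : ((PySem.List.pyRange (node+1) (N+1) 1).map
      (fun i => if reachDown (2*node).toNat i.toNat = true then PySem.List.pyGetD li i 0 else 0)).sum
      = Tsum (2*node) N li := by
    rw [Tsum]
    refine sum_map_ext _ (by omega) (fun i hi1 hi2 => ?_)
    rw [if_neg]
    intro hr
    have h3 := reach_ge hr
    omega
  have e2 : ((PySem.List.pyRange (node+1) (N+1) 1).map
      (fun i => if reachDown (2*node+1).toNat i.toNat = true then PySem.List.pyGetD li i 0 else 0)).sum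
      = Tsum (2*node+1) N li := by
    rw [Tsum]
    refine sum_map_ext _ (by omega) (fun i hi1 hi2 => ?_)
    rw [if_neg]
    intro hr
    have h3 := reach_ge hr
    omega
  conv_lhs => rw [Tsum, PySem.List.pyRange_one_cons (show node < N+1 from by omega)]
  simp only [List.map_cons, List.sum_cons]
  rw [reach_refl node.toNat, if_pos rfl, hsplit, e1, e2]
  ring

-- A's recursion computes the subtree sum and touches only indices whose chain reaches node
theorem backA_main (N : Int) : ∀ (fuel : Nat) (node : Int) (li : List Int), 1 ≤ node →
    N.toNat < node.toNat * 2 ^ fuel →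
    (backA fuel node N li).1 = Tsum node N li ∧
      ∀ q : Nat, ¬ (reachDown node.toNat q = true ∧ q ≤ N.toNat) →
        (backA fuel node N li).2.getD q 0 = li.getD q 0 := by
  intro fuel
  induction fuel with
  | zero =>
    intro node li h1 hf
    simp only [pow_zero, mul_one] at hf
    constructor
    · simp [backA, Tsum_empty (show N < node by omega)]
    · intro q _; simp [backA]
  | succ fuel ih =>
    intro node li h1 hf
    by_cases hle : node ≤ N
    · have hb1 : N.toNat < (node*2).toNat * 2 ^ fuel := by
        calc N.toNat < node.toNat * 2 ^ (fuel+1) := hf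
          _ = (node*2).toNat * 2 ^ fuel := by
            rw [show (node*2).toNat = 2 * node.toNat from by omega, pow_succ]; ring
      have hb2 : N.toNat < (node*2+1).toNat * 2 ^ fuel :=
        calc N.toNat < (node*2).toNat * 2 ^ fuel := hb1
          _ ≤ (node*2+1).toNat * 2 ^ fuel := Nat.mul_le_mul_right _ (by omega)
      obtain ⟨ihl1, ihl2⟩ := ih (node*2) li (by omega) hb1
      obtain ⟨ihr1, ihr2⟩ := ih (node*2+1) ((backA fuel (node*2) N li).2) (by omega) hb2
      have hnn : (0:Int) ≤ node := by omega
      -- value of li[node] is unchanged by both child calls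
      have hmid : (backA fuel (node*2+1) N (backA fuel (node*2) N li).2).2.getD node.toNat 0
          = li.getD node.toNat 0 := by
        rw [ihr2 node.toNat (by
            rintro ⟨hr, -⟩
            have := reach_ge hr
            omega),
          ihl2 node.toNat (by
            rintro ⟨hr, -⟩
            have := reach_ge hr
            omega)]
      have hr1' : (backA fuel (node*2+1) N (backA fuel (node*2) N li).2).1
          = Tsum (node*2+1) N li := by
        rw [ihr1]
        apply Tsum_congr (by omega)
        intro p hp hr
        apply ihl2
        rintro ⟨hl, -⟩
        exact reach_excl (node := node.toNat) (by omega) (by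
            have : (node*2).toNat = 2*node.toNat := by omega
            rwa [this] at hl) (by
            have : (node*2+1).toNat = 2*node.toNat+1 := by omega
            rwa [this] at hr)
      constructor
      · show (backA (fuel+1) node N li).1 = _
        simp only [backA, if_pos hle]
        rw [pyGetD_toNat hnn, hmid, ← pyGetD_toNat hnn, ihl1, hr1',
          Tsum_dec li (by omega) hle]
        have : node * 2 = 2 * node := by ring
        rw [this]; ring
      · intro q hq
        show (backA (fuel+1) node N li).2.getD q 0 = _
        simp only [backA, if_pos hle]
        have hqne : q ≠ node.toNat := by
          intro he
          apply hq
          subst he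
          exact ⟨reach_refl _, by omega⟩
        rw [PySem.List.pySetD_of_nonneg _ _ hnn]
        rw [List.getD_eq_getElem?_getD,
          List.getElem?_set_ne (show node.toNat ≠ q from by omega),
          ← List.getD_eq_getElem?_getD]
        rw [ihr2 q (by
            rintro ⟨hr, hle'⟩
            apply hq
            refine ⟨reach_child (by omega) (Or.inr ?_), hle'⟩
            have : (node*2+1).toNat = 2*node.toNat+1 := by omega
            rwa [this] at hr),
          ihl2 q (by
            rintro ⟨hr, hle'⟩
            apply hq
            refine ⟨reach_child (by omega) (Or.inl ?_), hle'⟩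
            have : (node*2).toNat = 2*node.toNat := by omega
            rwa [this] at hr)]
    · constructor
      · show (backA (fuel+1) node N li).1 = _
        simp [backA, hle, Tsum_empty (show N < node by omega)]
      · intro q _
        show (backA (fuel+1) node N li).2.getD q 0 = _
        simp [backA, hle]

theorem chase_eq (node : Int) (h1 : 1 ≤ node) :
    ∀ (fuel : Nat) (i : Int), 0 ≤ i → i.toNat < fuel + node.toNat →
    ((chase fuel node i == node) : Bool) = reachDown node.toNat i.toNat := by
  intro fuel
  induction fuel with
  | zero =>
    intro i h0 hf
    have : i < node := by omega
    simp only [chase]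
    rw [reach_le (by omega)]
    simp; omega
  | succ fuel ih =>
    intro i h0 hf
    by_cases hgt : node < i
    · simp only [chase, if_pos hgt]
      have hfd : PySem.Int.floordiv i 2 = ((i.toNat / 2 : Nat) : Int) := by
        rw [← Int.toNat_of_nonneg h0]
        exact_mod_cast PySem.Int.floordiv_natCast i.toNat 2
      rw [hfd, ih _ (by positivity) (by
          have : i.toNat / 2 < i.toNat := Nat.div_lt_self (by omega) (by omega)
          simp only [Int.toNat_natCast]
          omega)]
      simp only [Int.toNat_natCast]
      rw [reach_gt (show 1 ≤ node.toNat from by omega) (show node.toNat < i.toNat from by omega)]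
    · simp only [chase, if_neg hgt]
      rw [reach_le (by omega)]
      simp; omega

theorem alt_eq_Tsum (node N : Int) (li : List Int) (h1 : 1 ≤ node) :
    back_order_alt node N li = Tsum node N li := by
  unfold back_order_alt
  by_cases hgt : node > N
  · rw [if_pos hgt, Tsum_empty (by omega)]
  · rw [if_neg hgt, foldl_if_sum, zero_add]
    unfold Tsum
    apply congrArg
    apply List.map_congr_left
    intro i hi
    rw [PySem.List.mem_pyRange_one] at hi
    rw [chase_eq node h1 (i.toNat + 1) i (by omega) (by omega)]

-- ===== VERDICT (by name: the statement is the Claim_ definition above) =====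
theorem back_order_spec : Claim_equal_back_order := by
  intro node N li _ hpre
  unfold Spec_back_order
  rcases hpre with hlt | ⟨h1, -, -⟩
  · unfold back_order back_order_alt
    simp [backA, show ¬ node ≤ N by omega, show node > N by omega]
  · rw [alt_eq_Tsum node N li h1]
    unfold back_order
    refine (backA_main N (N.toNat+1) node li h1 ?_).1
    have hp : N.toNat < 2 ^ (N.toNat + 1) := by
      have := Nat.lt_two_pow_self (n := N.toNat)
      have : (2:Nat) ^ N.toNat ≤ 2 ^ (N.toNat+1) := Nat.pow_le_pow_right (by omega) (by omega)
      omega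
    calc N.toNat < 2 ^ (N.toNat + 1) := hp
      _ ≤ node.toNat * 2 ^ (N.toNat + 1) := Nat.le_mul_of_pos_left _ (by omega)
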